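-- pv_equiv track=rewrite | github.com/denaes/ti-marketplace-example | skills/engineering/qa-browser-automation/scripts/test_report_generator.py | count_findings_by_severity
-- ===== SOURCE A (Python) =====
-- from typing import Any
--
-- SEVERITY_ORDER = ["P0", "P1", "P2", "P3", "P4"]
--
-- def count_findings_by_severity(findings: list[dict[str, Any]]) -> dict[str, int]:
--     """Count findings grouped by severity."""
--     counts: dict[str, int] = {sev: 0 for sev in SEVERITY_ORDER}
--     for f in findings:
--         sev = f.get("severity", "P3")
--         if sev in counts:
--             counts[sev] += 1
--         else:
--             counts["P3"] += 1
--     return counts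
-- ===== SOURCE B (Python) =====
-- SEVERITY_ORDER = ["P0", "P1", "P2", "P3", "P4"]
--
-- def _norm(f):
--     sev = f.get("severity", "P3")
--     return sev if sev in SEVERITY_ORDER else "P3"
--
-- def count_findings_by_severity(findings):
--     """Count findings grouped by severity: one scan per severity category."""
--     return {sev: sum(1 for f in findings if _norm(f) == sev) for sev in SEVERITY_ORDER}
-- ===== Notes on version B (the rewrite author's own statement) =====
-- stated objective: alternative
-- what changed: Flipped the loop nesting: instead of one accumulating pass that increments a pre-initialised dict, B iterates over the five fixed severity categories and counts matching findings per category (normalising unknown/missing severities to P3).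
import Mathlib
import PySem

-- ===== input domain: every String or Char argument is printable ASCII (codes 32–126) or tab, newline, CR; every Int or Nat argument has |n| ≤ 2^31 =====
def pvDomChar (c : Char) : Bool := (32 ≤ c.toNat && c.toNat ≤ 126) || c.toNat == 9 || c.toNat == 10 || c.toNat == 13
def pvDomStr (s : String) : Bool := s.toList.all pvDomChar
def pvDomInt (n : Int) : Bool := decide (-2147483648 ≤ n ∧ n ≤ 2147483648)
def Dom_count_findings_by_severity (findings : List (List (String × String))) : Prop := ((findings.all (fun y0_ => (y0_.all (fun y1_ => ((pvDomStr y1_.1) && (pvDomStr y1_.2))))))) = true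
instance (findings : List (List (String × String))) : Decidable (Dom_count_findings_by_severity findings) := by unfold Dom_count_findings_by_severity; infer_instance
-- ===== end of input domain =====

-- B counts per fixed severity category (one scan per category) instead of A's single
-- accumulating pass over a pre-initialised dict; same return value everywhere.

-- ===== PORT A =====
def severityOrder : List String := ["P0", "P1", "P2", "P3", "P4"]

def count_findings_by_severity (findings : List (List (String × String))) : List (String × Int) :=
  -- counts = {sev: 0 for sev in SEVERITY_ORDER}
  let counts : PySem.Dict String Int :=
    severityOrder.foldl (fun d sev => d.insert sev 0) PySem.Dict.empty
  -- for f in findings: sev = f.get("severity", "P3"); if sev in counts: counts[sev] += 1 else counts["P3"] += 1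
  let counts := findings.foldl (fun counts f =>
    let sev := (PySem.Dict.mk f).getD "severity" "P3"
    if counts.contains sev then counts.modify sev 0 (· + 1)
    else counts.modify "P3" 0 (· + 1)) counts
  counts.items

-- ===== PORT B =====
def normSeverity (f : List (String × String)) : String :=
  let sev := (PySem.Dict.mk f).getD "severity" "P3"
  if sev ∈ severityOrder then sev else "P3"

def count_findings_by_severity_alt (findings : List (List (String × String))) : List (String × Int) :=
  severityOrder.map (fun sev => (sev, (findings.countP (fun f => normSeverity f == sev) : Int)))

-- ===== PRECONDITION & SPEC =====
def Spec_count_findings_by_severity (findings : List (List (String × String))) (out : List (String × Int)) : Prop := out = count_findings_by_severity_alt findings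
instance (findings : List (List (String × String))) (out : List (String × Int)) : Decidable (Spec_count_findings_by_severity findings out) := by unfold Spec_count_findings_by_severity; infer_instance

-- ===== CLAIM (what is proved, stated in full; the proofs are below) =====
def Claim_equal_count_findings_by_severity : Prop := ∀ (findings : List (List (String × String))), Dom_count_findings_by_severity findings → Spec_count_findings_by_severity findings (count_findings_by_severity findings)

-- ===== LEMMAS AND PROOFS =====

-- A's loop step, named for the proofs.
def stepA (counts : PySem.Dict String Int) (f : List (String × String)) : PySem.Dict String Int :=
  if counts.contains ((PySem.Dict.mk f).getD "severity" "P3")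
  then counts.modify ((PySem.Dict.mk f).getD "severity" "P3") 0 (· + 1)
  else counts.modify "P3" 0 (· + 1)

lemma keys_stepA (d : PySem.Dict String Int) (f : List (String × String))
    (hk : d.keys = severityOrder) : (stepA d f).keys = severityOrder := by
  unfold stepA
  set sev := (PySem.Dict.mk f).getD "severity" "P3" with hsev
  split_ifs with h
  · rw [PySem.Dict.keys_modify, PySem.Dict.keys_insert_of_contains _ _ h, hk]
  · have h3 : d.contains "P3" = true := by
      rw [PySem.Dict.contains_eq_decide_mem_keys, hk]; decide
    rw [PySem.Dict.keys_modify, PySem.Dict.keys_insert_of_contains _ _ h3, hk]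

lemma getD_stepA (d : PySem.Dict String Int) (f : List (String × String)) (k : String)
    (hk : d.keys = severityOrder) :
    (stepA d f).getD k 0 = d.getD k 0 + (if normSeverity f == k then 1 else 0) := by
  unfold stepA normSeverity
  set sev := (PySem.Dict.mk f).getD "severity" "P3" with hsev
  by_cases h : d.contains sev = true
  · have hmemsev : sev ∈ severityOrder := hk ▸ (PySem.Dict.contains_iff_mem_keys _ _).mp h
    rw [if_pos h, PySem.Dict.getD_modify, if_pos hmemsev]
    by_cases hks : k = sev
    · simp [hks]
    · have : ¬ sev = k := fun h' => hks h'.symm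
      simp [hks, this, beq_iff_eq]
  · have hnmem : sev ∉ severityOrder := fun hm => h ((PySem.Dict.contains_iff_mem_keys _ _).mpr (hk ▸ hm))
    rw [if_neg h, PySem.Dict.getD_modify, if_neg hnmem]
    by_cases hk3 : k = "P3"
    · simp [hk3]
    · have : ¬ ("P3" : String) = k := fun h' => hk3 h'.symm
      simp [hk3, this, beq_iff_eq]

lemma loopA (fs : List (List (String × String))) (d : PySem.Dict String Int)
    (hk : d.keys = severityOrder) :
    (fs.foldl stepA d).items
      = severityOrder.map (fun k => (k, d.getD k 0 + (fs.countP (fun f => normSeverity f == k) : Int))) := by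
  induction fs generalizing d with
  | nil =>
    simp only [List.foldl_nil, List.countP_nil]
    have hnd : d.keys.Nodup := by rw [hk]; decide
    rw [PySem.Dict.items_eq_map_keys d hnd 0, hk]
    simp
  | cons f fs ih =>
    rw [List.foldl_cons, ih (stepA d f) (keys_stepA d f hk)]
    apply List.map_congr_left
    intro k hkmem
    have := getD_stepA d f k hk
    rw [this]
    simp only [List.countP_cons]
    refine Prod.ext rfl ?_
    push_cast
    ring

lemma init_keys :
    (severityOrder.foldl (fun (d : PySem.Dict String Int) sev => d.insert sev 0) PySem.Dict.empty).keys
      = severityOrder := by decide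

lemma init_getD (k : String) (hk : k ∈ severityOrder) :
    (severityOrder.foldl (fun (d : PySem.Dict String Int) sev => d.insert sev 0) PySem.Dict.empty).getD k 0 = 0 := by
  fin_cases hk <;> decide

-- ===== VERDICT (by name: the statement is the Claim_ definition above) =====
theorem count_findings_by_severity_spec : Claim_equal_count_findings_by_severity := by
  intro findings _
  unfold Spec_count_findings_by_severity count_findings_by_severity count_findings_by_severity_alt
  show (findings.foldl stepA _).items = _
  rw [loopA _ _ init_keys]
  apply List.map_congr_left
  intro k hk
  rw [init_getD k hk, zero_add]
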